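-- pv_equiv track=rewrite | github.com/qed4950-web/job-craweler | profile_builder.py | match_catalog
-- ===== SOURCE A (Python) =====
-- from typing import Dict, List, Optional, Tuple
--
-- def match_catalog(text: str, catalog: Dict[str, List[str]]) -> List[str]:
--     hits: List[str] = []
--     for canonical, variants in catalog.items():
--         tokens = set([canonical.lower(), *[v.lower() for v in variants]])
--         if any(token.strip() and token.strip() in text for token in tokens):
--             hits.append(canonical)
--     # remove duplicates while preserving order
--     seen = set()
--     ordered = []
--     for item in hits:
--         if item not in seen:
--             ordered.append(item)
--             seen.add(item)
--     return ordered
-- ===== SOURCE B (Python) =====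
-- from typing import Dict, List
--
-- def match_catalog(text: str, catalog: Dict[str, List[str]]) -> List[str]:
--     # Inverted index: each distinct stripped token is tested against the text
--     # once, then matched canonical keys are emitted in catalog order.
--     index: Dict[str, set] = {}
--     for canonical, variants in catalog.items():
--         for tok in [canonical, *variants]:
--             t = tok.lower().strip()
--             if t:
--                 index.setdefault(t, set()).add(canonical)
--     matched = set()
--     for tok, keys in index.items():
--         if tok in text:
--             matched.update(keys)
--     return [k for k in catalog if k in matched]
-- ===== Notes on version B (the rewrite author's own statement) =====
-- stated objective: alternative
-- what changed: B inverts the traversal: it builds one token-to-keys index over the whole catalog, tests each distinct stripped token against the text exactly once to collect a matched-key set, then emits catalog keys in order; A instead runs a short-circuiting per-entry token scan and dedups afterwards.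
import Mathlib
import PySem

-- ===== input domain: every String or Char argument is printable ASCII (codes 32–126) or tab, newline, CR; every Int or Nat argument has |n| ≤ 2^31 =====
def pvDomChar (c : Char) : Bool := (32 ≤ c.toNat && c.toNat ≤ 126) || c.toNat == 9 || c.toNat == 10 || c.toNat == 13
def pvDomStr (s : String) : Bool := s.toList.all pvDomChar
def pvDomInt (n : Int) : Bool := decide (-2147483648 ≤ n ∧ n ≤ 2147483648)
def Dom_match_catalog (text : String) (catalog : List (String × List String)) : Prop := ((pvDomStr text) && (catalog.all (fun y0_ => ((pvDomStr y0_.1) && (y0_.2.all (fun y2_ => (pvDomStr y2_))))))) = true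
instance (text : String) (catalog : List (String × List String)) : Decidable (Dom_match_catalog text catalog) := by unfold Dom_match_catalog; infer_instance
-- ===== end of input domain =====

-- B replaces A's per-entry token scans + final dedup pass by an inverted token→keys
-- index tested once per distinct token; same return value, different traversal (objective: alternative).

-- ===== PORT A =====
def match_catalog (text : String) (catalog : List (String × List String)) : List String :=
  let hits : List String :=
    (PySem.Dict.ofList catalog).items.foldl
      (fun hits kv =>
        let tokens : PySem.Set String :=
          PySem.Set.ofList (PySem.Str.lower kv.1 :: kv.2.map (fun v => PySem.Str.lower v))
        if tokens.any (fun token =>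
            !(PySem.Str.strip token == "") && PySem.Str.isIn (PySem.Str.strip token) text)
        then hits ++ [kv.1] else hits) []
  (hits.foldl
    (fun (st : List String × PySem.Set String) item =>
      if PySem.Set.contains st.2 item then st
      else (st.1 ++ [item], PySem.Set.add st.2 item))
    ([], PySem.Set.empty)).1

-- ===== PORT B =====
def match_catalog_alt (text : String) (catalog : List (String × List String)) : List String :=
  let d := PySem.Dict.ofList catalog
  let index : PySem.Dict String (PySem.Set String) :=
    d.items.foldl
      (fun idx kv =>
        (kv.1 :: kv.2).foldl
          (fun idx tok =>
            let t := PySem.Str.strip (PySem.Str.lower tok)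
            if t == "" then idx
            else idx.insert t (PySem.Set.add (idx.getD t PySem.Set.empty) kv.1))
          idx)
      PySem.Dict.empty
  let matched : PySem.Set String :=
    index.items.foldl
      (fun m p => if PySem.Str.isIn p.1 text then PySem.Set.update m p.2 else m)
      PySem.Set.empty
  d.keys.filter (fun k => PySem.Set.contains matched k)

-- ===== PRECONDITION & SPEC =====
def Spec_match_catalog (text : String) (catalog : List (String × List String)) (out : List String) : Prop := out = match_catalog_alt text catalog
instance (text : String) (catalog : List (String × List String)) (out : List String) : Decidable (Spec_match_catalog text catalog out) := by unfold Spec_match_catalog; infer_instance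

-- ===== CLAIM (what is proved, stated in full; the proofs are below) =====
def Claim_equal_match_catalog : Prop := ∀ (text : String) (catalog : List (String × List String)), Dom_match_catalog text catalog → Spec_match_catalog text catalog (match_catalog text catalog)

-- ===== LEMMAS AND PROOFS =====

-- names for the intermediate values of the two ports (proof helpers)
def pvL (catalog : List (String × List String)) : List (String × List String) :=
  (PySem.Dict.ofList catalog).items

def pvIndex (catalog : List (String × List String)) : PySem.Dict String (PySem.Set String) :=
  (pvL catalog).foldl
    (fun idx kv =>
      (kv.1 :: kv.2).foldl
        (fun idx tok =>
          if PySem.Str.strip (PySem.Str.lower tok) == "" then idx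
          else idx.insert (PySem.Str.strip (PySem.Str.lower tok))
            (PySem.Set.add (idx.getD (PySem.Str.strip (PySem.Str.lower tok)) PySem.Set.empty) kv.1))
        idx)
    PySem.Dict.empty

def pvMatched (text : String) (catalog : List (String × List String)) : PySem.Set String :=
  (pvIndex catalog).items.foldl
    (fun m p => if PySem.Str.isIn p.1 text then PySem.Set.update m p.2 else m)
    PySem.Set.empty

-- the per-entry match condition both programs decide
def pvCond (text : String) (kv : String × List String) : Bool :=
  (kv.1 :: kv.2).any (fun tok =>
    !(PySem.Str.strip (PySem.Str.lower tok) == "") &&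
      PySem.Str.isIn (PySem.Str.strip (PySem.Str.lower tok)) text)

-- A's `any` over the per-entry token set equals pvCond
theorem pvA_any_eq (text : String) (kv : String × List String) :
    ((PySem.Set.ofList (PySem.Str.lower kv.1 :: kv.2.map (fun v => PySem.Str.lower v))).any
      (fun token => !(PySem.Str.strip token == "") && PySem.Str.isIn (PySem.Str.strip token) text))
    = pvCond text kv := by
  apply Bool.coe_iff_coe.mp
  rw [List.any_eq_true]
  unfold pvCond
  rw [List.any_eq_true]
  constructor
  · rintro ⟨x, hx, hp⟩
    rw [PySem.Set.mem_ofList] at hx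
    rcases List.mem_cons.mp hx with h | h
    · subst h
      exact ⟨kv.1, List.mem_cons_self, hp⟩
    · obtain ⟨v, hv, rfl⟩ := List.mem_map.mp h
      exact ⟨v, List.mem_cons_of_mem _ hv, hp⟩
  · rintro ⟨x, hx, hp⟩
    rcases List.mem_cons.mp hx with h | hv
    · subst h
      exact ⟨PySem.Str.lower kv.1, (PySem.Set.mem_ofList _ _).mpr List.mem_cons_self, hp⟩
    · exact ⟨PySem.Str.lower x,
        (PySem.Set.mem_ofList _ _).mpr (List.mem_cons_of_mem _ (List.mem_map_of_mem hv)), hp⟩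

-- A's dedup loop is the identity on a duplicate-free list
theorem pvDedup_nodup (hits : List String) (acc : List String) (seen : PySem.Set String)
    (hnd : hits.Nodup) (hdisj : ∀ x ∈ hits, x ∉ seen) :
    (hits.foldl
      (fun (st : List String × PySem.Set String) item =>
        if PySem.Set.contains st.2 item then st
        else (st.1 ++ [item], PySem.Set.add st.2 item))
      (acc, seen)).1 = acc ++ hits := by
  induction hits generalizing acc seen with
  | nil => simp
  | cons h t ih =>
    have hns : PySem.Set.contains seen h = false := by
      rcases Bool.eq_false_or_eq_true (PySem.Set.contains seen h) with hc | hc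
      · exact absurd ((PySem.Set.contains_iff seen h).mp hc) (hdisj h List.mem_cons_self)
      · exact hc
    simp only [List.foldl_cons, hns, Bool.false_eq_true, if_false]
    rw [ih (acc ++ [h]) (PySem.Set.add seen h) (List.nodup_cons.mp hnd).2 ?_, List.append_assoc]
    · rfl
    · intro x hx hmem
      rcases (PySem.Set.mem_add seen h x).mp hmem with hm | rfl
      · exact hdisj x (List.mem_cons_of_mem _ hx) hm
      · exact (List.nodup_cons.mp hnd).1 hx

-- membership in B's index after the inner (per-entry) token loop
theorem pvInner_mem (k : String) (ts : List String)
    (idx : PySem.Dict String (PySem.Set String)) (t k' : String) :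
    (k' ∈ (ts.foldl
        (fun idx tok =>
          if PySem.Str.strip (PySem.Str.lower tok) == "" then idx
          else idx.insert (PySem.Str.strip (PySem.Str.lower tok))
            (PySem.Set.add (idx.getD (PySem.Str.strip (PySem.Str.lower tok)) PySem.Set.empty) k))
        idx).getD t PySem.Set.empty)
    ↔ (k' ∈ idx.getD t PySem.Set.empty ∨
        (k' = k ∧ t ≠ "" ∧ ∃ tok ∈ ts, PySem.Str.strip (PySem.Str.lower tok) = t)) := by
  induction ts generalizing idx with
  | nil => simp
  | cons tok rest ih =>
    rw [List.foldl_cons, ih]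
    by_cases he : PySem.Str.strip (PySem.Str.lower tok) = ""
    · rw [if_pos (by simpa using he)]
      constructor
      · rintro (h | ⟨rfl, hne, w, hw, hwt⟩)
        · exact Or.inl h
        · exact Or.inr ⟨rfl, hne, w, List.mem_cons_of_mem _ hw, hwt⟩
      · rintro (h | ⟨rfl, hne, w, hw, hwt⟩)
        · exact Or.inl h
        · rcases List.mem_cons.mp hw with rfl | hw
          · exact absurd (hwt ▸ he).symm hne.symm
          · exact Or.inr ⟨rfl, hne, w, hw, hwt⟩
    · rw [if_neg (by simpa using he), PySem.Dict.getD_insert]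
      by_cases ht : t = PySem.Str.strip (PySem.Str.lower tok)
      · rw [if_pos ht]
        subst ht
        constructor
        · rintro (h | ⟨rfl, hne, w, hw, hwt⟩)
          · rcases (PySem.Set.mem_add _ _ _).mp h with hm | rfl
            · exact Or.inl hm
            · exact Or.inr ⟨rfl, he, tok, List.mem_cons_self, rfl⟩
          · exact Or.inr ⟨rfl, hne, w, List.mem_cons_of_mem _ hw, hwt⟩
        · rintro (h | ⟨rfl, hne, w, hw, hwt⟩)
          · exact Or.inl ((PySem.Set.mem_add _ _ _).mpr (Or.inl h))
          · rcases List.mem_cons.mp hw with rfl | hw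
            · exact Or.inl ((PySem.Set.mem_add _ _ _).mpr (Or.inr rfl))
            · exact Or.inr ⟨rfl, hne, w, hw, hwt⟩
      · rw [if_neg ht]
        constructor
        · rintro (h | ⟨rfl, hne, w, hw, hwt⟩)
          · exact Or.inl h
          · exact Or.inr ⟨rfl, hne, w, List.mem_cons_of_mem _ hw, hwt⟩
        · rintro (h | ⟨rfl, hne, w, hw, hwt⟩)
          · exact Or.inl h
          · rcases List.mem_cons.mp hw with rfl | hw
            · exact absurd hwt.symm ht
            · exact Or.inr ⟨rfl, hne, w, hw, hwt⟩

-- membership in B's full index fold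
theorem pvIndexFold_mem (L : List (String × List String))
    (idx : PySem.Dict String (PySem.Set String)) (t k' : String) :
    (k' ∈ (L.foldl
        (fun idx kv =>
          (kv.1 :: kv.2).foldl
            (fun idx tok =>
              if PySem.Str.strip (PySem.Str.lower tok) == "" then idx
              else idx.insert (PySem.Str.strip (PySem.Str.lower tok))
                (PySem.Set.add (idx.getD (PySem.Str.strip (PySem.Str.lower tok)) PySem.Set.empty) kv.1))
            idx)
        idx).getD t PySem.Set.empty)
    ↔ (k' ∈ idx.getD t PySem.Set.empty ∨
        ∃ kv ∈ L, kv.1 = k' ∧ t ≠ "" ∧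
          ∃ tok ∈ (kv.1 :: kv.2), PySem.Str.strip (PySem.Str.lower tok) = t) := by
  induction L generalizing idx with
  | nil => simp
  | cons kv rest ih =>
    rw [List.foldl_cons]
    refine Iff.trans (ih _) ?_
    beta_reduce
    rw [pvInner_mem]
    constructor
    · rintro ((h | ⟨rfl, hne, w, hw, hwt⟩) | ⟨kv', hkv', hk, hne, w, hw, hwt⟩)
      · exact Or.inl h
      · exact Or.inr ⟨kv, List.mem_cons_self, rfl, hne, w, hw, hwt⟩
      · exact Or.inr ⟨kv', List.mem_cons_of_mem _ hkv', hk, hne, w, hw, hwt⟩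
    · rintro (h | ⟨kv', hkv', hk, hne, w, hw, hwt⟩)
      · exact Or.inl (Or.inl h)
      · rcases List.mem_cons.mp hkv' with rfl | hkv'
        · exact Or.inl (Or.inr ⟨hk.symm, hne, w, hw, hwt⟩)
        · exact Or.inr ⟨kv', hkv', hk, hne, w, hw, hwt⟩

-- one conditional insert keeps the keys duplicate-free
theorem pvStep_nodup (k tok : String) (idx : PySem.Dict String (PySem.Set String))
    (h : idx.keys.Nodup) :
    ((if PySem.Str.strip (PySem.Str.lower tok) == "" then idx
      else idx.insert (PySem.Str.strip (PySem.Str.lower tok))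
        (PySem.Set.add (idx.getD (PySem.Str.strip (PySem.Str.lower tok)) PySem.Set.empty) k)) :
      PySem.Dict String (PySem.Set String)).keys.Nodup := by
  by_cases he : (PySem.Str.strip (PySem.Str.lower tok) == "") = true
  · rw [if_pos he]; exact h
  · rw [if_neg he]; exact PySem.Dict.nodup_keys_insert _ _ _ h

-- the inner token loop keeps the keys duplicate-free
theorem pvInnerLoop_nodup (k : String) (ts : List String)
    (idx : PySem.Dict String (PySem.Set String)) (h : idx.keys.Nodup) :
    (ts.foldl
      (fun idx tok =>
        if PySem.Str.strip (PySem.Str.lower tok) == "" then idx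
        else idx.insert (PySem.Str.strip (PySem.Str.lower tok))
          (PySem.Set.add (idx.getD (PySem.Str.strip (PySem.Str.lower tok)) PySem.Set.empty) k))
      idx).keys.Nodup := by
  induction ts generalizing idx with
  | nil => exact h
  | cons tok rest ih =>
    rw [List.foldl_cons]
    exact ih _ (pvStep_nodup k tok idx h)

-- B's index has duplicate-free keys
theorem pvIndex_nodup (catalog : List (String × List String)) :
    (pvIndex catalog).keys.Nodup := by
  unfold pvIndex
  generalize pvL catalog = L
  have : (PySem.Dict.empty : PySem.Dict String (PySem.Set String)).keys.Nodup := by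
    simp [PySem.Dict.empty]
  generalize (PySem.Dict.empty : PySem.Dict String (PySem.Set String)) = idx at this ⊢
  induction L generalizing idx with
  | nil => exact this
  | cons kv rest ih =>
    rw [List.foldl_cons]
    exact ih _ (pvInnerLoop_nodup kv.1 _ idx this)

-- membership in B's matched set (fold over the index items)
theorem pvMatchedFold_mem (text : String) (items : List (String × PySem.Set String))
    (m : PySem.Set String) (k : String) :
    (k ∈ items.foldl
        (fun m p => if PySem.Str.isIn p.1 text then PySem.Set.update m p.2 else m) m)
    ↔ (k ∈ m ∨ ∃ p ∈ items, PySem.Str.isIn p.1 text = true ∧ k ∈ p.2) := by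
  induction items generalizing m with
  | nil => simp
  | cons p rest ih =>
    rw [List.foldl_cons]
    by_cases hp : PySem.Str.isIn p.1 text = true
    · rw [if_pos hp, ih]
      constructor
      · rintro (h | ⟨q, hq, hqt, hqm⟩)
        · rcases (PySem.Set.mem_update m p.2 k).mp h with hm | hm
          · exact Or.inl hm
          · exact Or.inr ⟨p, List.mem_cons_self, hp, hm⟩
        · exact Or.inr ⟨q, List.mem_cons_of_mem _ hq, hqt, hqm⟩
      · rintro (h | ⟨q, hq, hqt, hqm⟩)
        · exact Or.inl ((PySem.Set.mem_update m p.2 k).mpr (Or.inl h))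
        · rcases List.mem_cons.mp hq with rfl | hq
          · exact Or.inl ((PySem.Set.mem_update m q.2 k).mpr (Or.inr hqm))
          · exact Or.inr ⟨q, hq, hqt, hqm⟩
    · rw [if_neg hp, ih]
      constructor
      · rintro (h | ⟨q, hq, hqt, hqm⟩)
        · exact Or.inl h
        · exact Or.inr ⟨q, List.mem_cons_of_mem _ hq, hqt, hqm⟩
      · rintro (h | ⟨q, hq, hqt, hqm⟩)
        · exact Or.inl h
        · rcases List.mem_cons.mp hq with rfl | hq
          · exact absurd hqt hp
          · exact Or.inr ⟨q, hq, hqt, hqm⟩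

-- k is matched in B iff some catalog entry with key k satisfies pvCond
theorem pvMatched_char (text : String) (catalog : List (String × List String)) (k : String) :
    k ∈ pvMatched text catalog ↔ ∃ kv ∈ pvL catalog, kv.1 = k ∧ pvCond text kv = true := by
  unfold pvMatched
  rw [pvMatchedFold_mem]
  constructor
  · rintro (h | ⟨p, hp, hpt, hpm⟩)
    · simp [PySem.Set.empty] at h
    · have hg : (pvIndex catalog).getD p.1 PySem.Set.empty = p.2 :=
        PySem.Dict.getD_of_mem_items _ hp (pvIndex_nodup catalog) _
      have hk : k ∈ (pvIndex catalog).getD p.1 PySem.Set.empty := hg ▸ hpm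
      unfold pvIndex at hk
      rcases (pvIndexFold_mem _ _ _ _).mp hk with h | ⟨kv, hkv, hk1, hne, w, hw, hwt⟩
      · simp [PySem.Dict.getD_empty, PySem.Set.empty] at h
      · refine ⟨kv, hkv, hk1, ?_⟩
        unfold pvCond
        rw [List.any_eq_true]
        refine ⟨w, hw, ?_⟩
        have h1 : (p.1 == "") = false := by simpa using hne
        rw [hwt, hpt, h1]
        rfl
  · rintro ⟨kv, hkv, hk1, hc⟩
    unfold pvCond at hc
    rw [List.any_eq_true] at hc
    obtain ⟨w, hw, hcw⟩ := hc
    obtain ⟨hne', hin⟩ := (Bool.and_eq_true _ _) ▸ hcw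
    have hne : PySem.Str.strip (PySem.Str.lower w) ≠ "" := by
      intro hc0; rw [hc0] at hne'; simp at hne'
    have hmem : k ∈ (pvIndex catalog).getD (PySem.Str.strip (PySem.Str.lower w)) PySem.Set.empty := by
      unfold pvIndex
      rw [pvIndexFold_mem]
      exact Or.inr ⟨kv, hkv, hk1, hne, w, hw, rfl⟩
    have hcont : (pvIndex catalog).contains (PySem.Str.strip (PySem.Str.lower w)) = true := by
      rcases Bool.eq_false_or_eq_true ((pvIndex catalog).contains (PySem.Str.strip (PySem.Str.lower w))) with hc0 | hc0
      · exact hc0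
      · rw [PySem.Dict.getD_of_not_contains _ _ hc0] at hmem
        simp [PySem.Set.empty] at hmem
    rw [PySem.Dict.contains_eq_isSome_get?] at hcont
    obtain ⟨v, hv⟩ := Option.isSome_iff_exists.mp hcont
    refine Or.inr ⟨(PySem.Str.strip (PySem.Str.lower w), v),
      PySem.Dict.mem_items_of_get?_eq_some _ hv, hin, ?_⟩
    rwa [PySem.Dict.getD_of_get?_eq_some _ _ hv] at hmem

-- ===== VERDICT (by name: the statement is the Claim_ definition above) =====
theorem match_catalog_spec : Claim_equal_match_catalog := by
  intro text catalog _
  unfold Spec_match_catalog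
  have hnd : ((pvL catalog).map (fun kv => kv.1)).Nodup := PySem.Dict.nodup_keys_ofList catalog
  -- A's value is the pvCond-filtered key list
  have hA : match_catalog text catalog = ((pvL catalog).filter (pvCond text)).map (fun kv => kv.1) := by
    show (((pvL catalog).foldl
        (fun hits kv =>
          if (PySem.Set.ofList (PySem.Str.lower kv.1 :: kv.2.map (fun v => PySem.Str.lower v))).any
              (fun token => !(PySem.Str.strip token == "") && PySem.Str.isIn (PySem.Str.strip token) text)
          then hits ++ [kv.1] else hits) []).foldl
        (fun (st : List String × PySem.Set String) item =>
          if PySem.Set.contains st.2 item then st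
          else (st.1 ++ [item], PySem.Set.add st.2 item))
        ([], PySem.Set.empty)).1
      = ((pvL catalog).filter (pvCond text)).map (fun kv => kv.1)
    rw [PySem.List.foldl_congr_mem (pvL catalog)
        (fun hits kv =>
          if (PySem.Set.ofList (PySem.Str.lower kv.1 :: kv.2.map (fun v => PySem.Str.lower v))).any
              (fun token => !(PySem.Str.strip token == "") && PySem.Str.isIn (PySem.Str.strip token) text)
          then hits ++ [kv.1] else hits)
        (fun acc kv => if pvCond text kv then acc ++ [kv.1] else acc) []
        (fun acc kv _ => by beta_reduce; rw [pvA_any_eq]),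
      PySem.List.foldl_append_if (pvCond text) (fun kv => kv.1), List.nil_append]
    have hhnd : (((pvL catalog).filter (pvCond text)).map (fun kv => kv.1)).Nodup :=
      List.Nodup.sublist (List.Sublist.map _ List.filter_sublist) hnd
    rw [pvDedup_nodup _ [] PySem.Set.empty hhnd (by simp [PySem.Set.empty]), List.nil_append]
  -- B's value is the matched-filtered key list
  have hB : match_catalog_alt text catalog
      = ((pvL catalog).map (fun kv => kv.1)).filter
          (fun k => PySem.Set.contains (pvMatched text catalog) k) := rfl
  rw [hA, hB, List.filter_map]
  refine congrArg _ (List.filter_congr ?_)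
  intro kv hkv
  show pvCond text kv = PySem.Set.contains (pvMatched text catalog) kv.1
  apply Bool.coe_iff_coe.mp
  rw [PySem.Set.contains_iff, pvMatched_char]
  constructor
  · intro hc
    exact ⟨kv, hkv, rfl, hc⟩
  · rintro ⟨kv', hkv', hk, hc⟩
    have hkv2 : kv' = kv := List.inj_on_of_nodup_map hnd hkv' hkv hk
    exact hkv2 ▸ hc
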